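-- pv_equiv track=rewrite | github.com/AlgorithmWithFriend/Day1 | Day11/StrangeStr_sb.py | solution
-- ===== SOURCE A (Python) =====
-- def solution(s):
--     answer = ''
--     idx = 0
--     for i in range(len(s)):
--         if s[i].isalpha():
--             if idx % 2 == 0:
--                 answer += s[i].upper()
--             else : answer += s[i].lower()
--             idx += 1
--         else :
--             idx = 0
--             answer += ' '
--     return answer
-- ===== SOURCE B (Python) =====
-- def solution(s):
--     # Run-based decomposition: split s into maximal alpha/non-alpha runs,
--     # re-case each alpha run with its own index starting at 0.
--     pieces = []
--     i = 0
--     n = len(s)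
--     while i < n:
--         alpha = s[i].isalpha()
--         j = i + 1
--         while j < n and s[j].isalpha() == alpha:
--             j += 1
--         run = s[i:j]
--         if alpha:
--             pieces.append(''.join(c.upper() if k % 2 == 0 else c.lower()
--                                   for k, c in enumerate(run)))
--         else:
--             pieces.append(' ' * (j - i))
--         i = j
--     return ''.join(pieces)
-- ===== Notes on version B (the rewrite author's own statement) =====
-- stated objective: alternative
-- what changed: Replaces the flat stateful loop with an idx counter that resets on non-alpha characters by a run-based decomposition: split the string into maximal alpha/non-alpha runs, alternate case per alpha run via enumerate, emit spaces for non-alpha runs, and join the pieces.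
import Mathlib
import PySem

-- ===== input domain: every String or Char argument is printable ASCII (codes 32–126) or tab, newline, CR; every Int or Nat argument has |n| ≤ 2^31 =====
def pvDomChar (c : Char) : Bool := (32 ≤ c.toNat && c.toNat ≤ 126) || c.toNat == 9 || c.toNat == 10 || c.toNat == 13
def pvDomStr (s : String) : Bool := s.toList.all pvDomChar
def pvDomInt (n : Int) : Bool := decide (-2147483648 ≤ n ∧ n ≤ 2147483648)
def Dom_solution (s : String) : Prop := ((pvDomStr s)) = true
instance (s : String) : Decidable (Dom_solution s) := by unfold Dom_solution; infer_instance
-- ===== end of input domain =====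

-- B is an alternative decomposition (maximal alpha/non-alpha runs) of A's flat idx-resetting loop.

-- ===== PORT A =====
-- flat left-to-right loop over the characters with state (answer, idx)
def solution (s : String) : String :=
  String.mk (s.toList.foldl (fun (st : List Char × Nat) c =>
    if PySem.Chars.isalpha c then
      (st.1 ++ [if st.2 % 2 == 0 then PySem.Chars.upperChar c else PySem.Chars.lowerChar c], st.2 + 1)
    else (st.1 ++ [' '], 0)) ([], 0)).1

-- ===== PORT B =====
-- one maximal run per step: the alpha run is re-cased via enumerate, the non-alpha run becomes spaces
def solutionAltGo : List Char → List Char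
  | [] => []
  | c :: cs =>
    let alpha := PySem.Chars.isalpha c
    let run := c :: cs.takeWhile (fun d => PySem.Chars.isalpha d == alpha)
    let rest := cs.dropWhile (fun d => PySem.Chars.isalpha d == alpha)
    (if alpha then
      (PySem.List.enumerate run 0).map
        (fun q => if PySem.Int.mod q.1 2 == 0 then PySem.Chars.upperChar q.2
                  else PySem.Chars.lowerChar q.2)
     else List.replicate run.length ' ') ++ solutionAltGo rest
termination_by cs => cs.length
decreasing_by
  exact Nat.lt_succ_of_le (List.length_dropWhile_le _ _)

def solution_alt (s : String) : String := String.mk (solutionAltGo s.toList)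

-- ===== PRECONDITION & SPEC =====
def Spec_solution (s : String) (out : String) : Prop := out = solution_alt s
instance (s : String) (out : String) : Decidable (Spec_solution s out) := by unfold Spec_solution; infer_instance

-- ===== CLAIM (what is proved, stated in full; the proofs are below) =====
def Claim_equal_solution : Prop := ∀ (s : String), Dom_solution s → Spec_solution s (solution s)

-- ===== LEMMAS AND PROOFS =====

-- A's loop, recast as structural recursion producing the output suffix from the current idx
def goA : List Char → Nat → List Char
  | [], _ => []
  | c :: cs, idx =>
    if PySem.Chars.isalpha c then
      (if idx % 2 == 0 then PySem.Chars.upperChar c else PySem.Chars.lowerChar c) :: goA cs (idx + 1)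
    else ' ' :: goA cs 0

lemma foldl_eq_goA (cs : List Char) (acc : List Char) (idx : Nat) :
    (cs.foldl (fun (st : List Char × Nat) c =>
      if PySem.Chars.isalpha c then
        (st.1 ++ [if st.2 % 2 == 0 then PySem.Chars.upperChar c else PySem.Chars.lowerChar c], st.2 + 1)
      else (st.1 ++ [' '], 0)) (acc, idx)).1 = acc ++ goA cs idx := by
  induction cs generalizing acc idx with
  | nil => simp [goA]
  | cons c cs ih =>
    rw [List.foldl_cons]
    by_cases h : PySem.Chars.isalpha c
    · rw [if_pos h, ih]; simp [goA, h]
    · rw [if_neg h, ih]; simp [goA, h]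

-- if the first character is non-alpha (or the list is empty), the incoming idx is irrelevant
lemma goA_idx_irrel (cs : List Char) (k : Nat)
    (h : ∀ c ∈ cs.head?, PySem.Chars.isalpha c = false) : goA cs k = goA cs 0 := by
  cases cs with
  | nil => rfl
  | cons c cs => simp [goA, h c (by simp)]

-- an all-alpha (possibly empty) prefix is emitted with alternating case counted from k
lemma goA_alpha_run (run : List Char) (rest : List Char) (k : Nat)
    (h : ∀ c ∈ run, PySem.Chars.isalpha c = true) :
    goA (run ++ rest) k =
      (PySem.List.enumerate run (k : Int)).map
        (fun q => if PySem.Int.mod q.1 2 == 0 then PySem.Chars.upperChar q.2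
                  else PySem.Chars.lowerChar q.2) ++ goA rest (k + run.length) := by
  induction run generalizing k with
  | nil => simp [PySem.List.enumerate]
  | cons c run ih =>
    have hc := h c (by simp)
    have hmod : (PySem.Int.mod (k : Int) 2 == 0) = (k % 2 == 0) := by
      have : PySem.Int.mod (k : Int) 2 = ((k % 2 : Nat) : Int) := PySem.Int.mod_natCast k 2
      rw [this]
      cases Nat.decEq (k % 2) 0 with
      | isTrue ht => simp [ht]
      | isFalse hf => simp [hf]; omega
    rw [List.cons_append]
    simp only [goA, hc, if_true]
    have hcast : ((k : Int) + 1) = ((k + 1 : Nat) : Int) := by push_cast; ring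
    rw [ih (k + 1) (fun d hd => h d (List.mem_cons_of_mem _ hd)),
        PySem.List.enumerate_cons, hcast]
    simp only [List.map_cons, List.cons_append, List.length_cons, hmod]
    have harith : k + 1 + run.length = k + (run.length + 1) := by omega
    rw [harith]

-- an all-non-alpha nonempty prefix is emitted as spaces and resets the idx
lemma goA_nonalpha_run (run : List Char) (rest : List Char) (k : Nat)
    (hne : run ≠ []) (h : ∀ c ∈ run, PySem.Chars.isalpha c = false) :
    goA (run ++ rest) k = List.replicate run.length ' ' ++ goA rest 0 := by
  induction run generalizing k with
  | nil => exact absurd rfl hne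
  | cons c run ih =>
    have hc := h c (by simp)
    rw [List.cons_append]
    simp only [goA, hc]
    cases run with
    | nil => simp
    | cons d run' =>
      rw [ih 0 (by simp) (fun c hc => h c (by simp [hc]))]
      simp [List.replicate_succ]

lemma solutionAltGo_eq_goA : ∀ (n : Nat) (cs : List Char), cs.length ≤ n →
    solutionAltGo cs = goA cs 0 := by
  intro n
  induction n with
  | zero =>
    intro cs h
    have : cs = [] := List.eq_nil_of_length_eq_zero (Nat.le_zero.mp h)
    subst this; simp [solutionAltGo, goA]
  | succ n ih =>
    intro cs hlen
    cases cs with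
    | nil => simp [solutionAltGo, goA]
    | cons c cs =>
      rw [solutionAltGo]
      set p := fun d => PySem.Chars.isalpha d == PySem.Chars.isalpha c with hp
      have hsplit : c :: cs = (c :: cs.takeWhile p) ++ cs.dropWhile p := by
        simp [List.takeWhile_append_dropWhile]
      have hrest_le : (cs.dropWhile p).length ≤ n := by
        have := List.length_dropWhile_le p cs
        simp at hlen; omega
      have hrest := ih _ hrest_le
      have hhead : ∀ d ∈ (cs.dropWhile p).head?, PySem.Chars.isalpha d ≠ PySem.Chars.isalpha c := by
        intro d hd
        have : ¬ p d = true := by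
          cases hdw : cs.dropWhile p with
          | nil => simp [hdw] at hd
          | cons e es =>
            simp [hdw] at hd
            subst hd
            have hne : cs.dropWhile p ≠ [] := by simp [hdw]
            have hnp := List.head_dropWhile_not p hne
            have he : (cs.dropWhile p).head hne = e := by simp [hdw]
            rw [he] at hnp
            simpa using hnp
        simpa [hp] using this
      by_cases ha : PySem.Chars.isalpha c
      · have hall : ∀ d ∈ c :: cs.takeWhile p, PySem.Chars.isalpha d = true := by
          intro d hd
          rcases List.mem_cons.mp hd with h1 | h1
          · subst h1; exact ha
          · have := List.mem_takeWhile_imp h1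
            simpa [hp, ha] using this
        conv_rhs => rw [hsplit]
        rw [goA_alpha_run _ _ 0 hall]
        rw [goA_idx_irrel _ _ (by intro d hd; simpa [ha] using hhead d hd)]
        simp [ha, hrest]
      · have hall : ∀ d ∈ c :: cs.takeWhile p, PySem.Chars.isalpha d = false := by
          intro d hd
          rcases List.mem_cons.mp hd with h1 | h1
          · subst h1; simpa using ha
          · have := List.mem_takeWhile_imp h1
            simp [hp] at this
            simp [this, ha]
        conv_rhs => rw [hsplit]
        rw [goA_nonalpha_run _ _ 0 (by simp) hall]
        simp [ha, hrest]

-- ===== VERDICT (by name: the statement is the Claim_ definition above) =====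
theorem solution_spec : Claim_equal_solution := by
  intro s _
  unfold Spec_solution solution solution_alt
  rw [foldl_eq_goA, solutionAltGo_eq_goA s.toList.length s.toList le_rfl]
  simp
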